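-- pv_equiv track=rewrite | github.com/yeongseon/azure-virtual-machine-practical-guide | scripts/validate_content_sources.py | find_mermaid_blocks
-- ===== SOURCE A (Python) =====
-- from typing import Dict, List, Optional, Tuple
--
-- def find_mermaid_blocks(content: str) -> List[Tuple[int, str]]:
--     """
--     Find all mermaid code blocks in content.
--     Returns list of (line_number, block_content).
--     """
--     blocks = []
--     lines = content.split("\n")
--     in_mermaid = False
--     block_start = 0
--     block_content = []
--     fence_indent = 0
--
--     for i, line in enumerate(lines, 1):
--         stripped = line.lstrip()
--         indent = len(line) - len(stripped)
--
--         if not in_mermaid: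
--             if stripped.startswith("```mermaid"):
--                 in_mermaid = True
--                 block_start = i
--                 fence_indent = indent
--                 block_content = [line]
--         else:
--             block_content.append(line)
--             # Check for closing fence at same or less indentation
--             if stripped.startswith("```") and indent <= fence_indent:
--                 in_mermaid = False
--                 blocks.append((block_start, "\n".join(block_content)))
--
--     return blocks
-- ===== SOURCE B (Python) =====
-- def find_mermaid_blocks(content):
--     """Index-driven scan: outer loop finds an opening fence, inner loop
--     collects until the closing fence; unclosed trailing blocks are dropped."""
--     lines = content.split("\n")
--     n = len(lines)
--     blocks = []
--     i = 0
--     while i < n: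
--         line = lines[i]
--         stripped = line.lstrip()
--         if stripped.startswith("```mermaid"):
--             fence_indent = len(line) - len(stripped)
--             buf = [line]
--             j = i + 1
--             closed = False
--             while j < n:
--                 cur = lines[j]
--                 s = cur.lstrip()
--                 buf.append(cur)
--                 if s.startswith("```") and len(cur) - len(s) <= fence_indent:
--                     closed = True
--                     break
--                 j += 1
--             if closed:
--                 blocks.append((i + 1, "\n".join(buf)))
--                 i = j + 1
--             else:
--                 i = n
--         else:
--             i += 1
--     return blocks
-- ===== Notes on version B (the rewrite author's own statement) =====
-- stated objective: alternative
-- what changed: Replaced A's boolean-flag single-pass state machine with an index-driven outer scan that, on each opening fence, runs an inner loop collecting lines until the closing fence and resumes after it.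
import Mathlib
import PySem

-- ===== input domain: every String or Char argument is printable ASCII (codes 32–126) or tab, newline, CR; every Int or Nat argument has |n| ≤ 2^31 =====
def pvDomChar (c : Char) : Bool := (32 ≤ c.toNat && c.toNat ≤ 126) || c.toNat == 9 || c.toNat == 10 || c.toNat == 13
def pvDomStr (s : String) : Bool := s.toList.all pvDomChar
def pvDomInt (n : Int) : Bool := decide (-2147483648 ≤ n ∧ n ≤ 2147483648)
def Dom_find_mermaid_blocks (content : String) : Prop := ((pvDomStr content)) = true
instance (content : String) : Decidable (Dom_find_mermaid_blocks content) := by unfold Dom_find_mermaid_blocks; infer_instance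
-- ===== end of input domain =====

-- B replaces A's boolean-flag state machine by an index-driven outer scan with an
-- inner collect-until-closing-fence loop (objective: alternative decomposition, same cost).

-- ===== PORT A =====
-- one iteration of A's for-loop over enumerate(lines, 1); state is
-- (blocks, in_mermaid, block_start, block_content, fence_indent)
def stepA : (List (Int × String) × Bool × Int × List String × Int) → (Int × String) →
    (List (Int × String) × Bool × Int × List String × Int)
  | (blocks, in_mermaid, block_start, block_content, fence_indent), (i, line) =>
    let stripped := PySem.Str.lstrip line
    let indent := PySem.Str.len line - PySem.Str.len stripped
    if !in_mermaid then
      if PySem.Str.startswith stripped "```mermaid" then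
        (blocks, true, i, [line], indent)
      else
        (blocks, in_mermaid, block_start, block_content, fence_indent)
    else
      let bc := block_content ++ [line]
      if PySem.Str.startswith stripped "```" ∧ indent ≤ fence_indent then
        (blocks ++ [(block_start, PySem.Str.join "\n" bc)], false, block_start, bc, fence_indent)
      else
        (blocks, in_mermaid, block_start, bc, fence_indent)

def find_mermaid_blocks (content : String) : List (Int × String) :=
  let lines := (PySem.Str.split? content "\n").getD []
  (List.foldl stepA ([], false, 0, [], 0) (PySem.List.enumerate lines 1)).1

-- ===== PORT B =====
-- B's inner while-loop: collect lines into the buffer until a closing fence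
-- (lstrip starts with "```" and indent ≤ fence_indent); none = ran off the end unclosed.
-- Returns (buffer after the opening line, number of lines consumed, remaining lines).
def altInner (fence_indent : Int) : List String → Option (List String × Int × List String)
  | [] => none
  | cur :: rest =>
    let s := PySem.Str.lstrip cur
    if PySem.Str.startswith s "```" ∧ PySem.Str.len cur - PySem.Str.len s ≤ fence_indent then
      some ([cur], 1, rest)
    else
      match altInner fence_indent rest with
      | none => none
      | some (buf, c, r) => some (cur :: buf, c + 1, r)

-- needed by altScan's termination: the inner loop only ever drops lines
theorem altInner_length (fi : Int) : ∀ (rest : List String) {buf : List String} {c : Int}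
    {r : List String}, altInner fi rest = some (buf, c, r) → r.length ≤ rest.length := by
  intro rest
  induction rest with
  | nil => intro _ _ _ h; simp [altInner] at h
  | cons cur rest ih =>
    intro buf c r h
    simp only [altInner] at h
    split at h
    · simp at h
      obtain ⟨_, _, hr⟩ := h; subst hr; simp
    · cases hin : altInner fi rest with
      | none => rw [hin] at h; simp at h
      | some v =>
        obtain ⟨b, cc, rr⟩ := v
        rw [hin] at h; simp at h
        obtain ⟨_, _, hr⟩ := h
        subst hr
        exact le_trans (ih hin) (Nat.le_succ _)

-- B's outer while-loop, as recursion on the remaining lines with 1-based counter i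
def altScan (lines : List String) (i : Int) : List (Int × String) :=
  match lines with
  | [] => []
  | line :: rest =>
    let s := PySem.Str.lstrip line
    if PySem.Str.startswith s "```mermaid" then
      match hin : altInner (PySem.Str.len line - PySem.Str.len s) rest with
      | none => []
      | some (buf, c, r) =>
        (i, PySem.Str.join "\n" (line :: buf)) :: altScan r (i + 1 + c)
    else
      altScan rest (i + 1)
termination_by lines.length
decreasing_by
  · exact Nat.lt_succ_of_le (altInner_length _ _ hin)
  · simp

def find_mermaid_blocks_alt (content : String) : List (Int × String) :=
  altScan ((PySem.Str.split? content "\n").getD []) 1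

-- ===== PRECONDITION & SPEC =====
def Spec_find_mermaid_blocks (content : String) (out : List (Int × String)) : Prop := out = find_mermaid_blocks_alt content
instance (content : String) (out : List (Int × String)) : Decidable (Spec_find_mermaid_blocks content out) := by unfold Spec_find_mermaid_blocks; infer_instance

-- ===== CLAIM (what is proved, stated in full; the proofs are below) =====
def Claim_equal_find_mermaid_blocks : Prop := ∀ (content : String), Dom_find_mermaid_blocks content → Spec_find_mermaid_blocks content (find_mermaid_blocks content)

-- ===== LEMMAS AND PROOFS =====

-- While A is inside a block, its fold agrees with B's inner loop: either the block never
-- closes (nothing is emitted) or it closes and the fold resumes, the block appended.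
theorem foldA_in_mermaid : ∀ (rest : List String) (k : Int) (acc : List (Int × String))
    (bs : Int) (bc : List String) (fi : Int),
    (List.foldl stepA (acc, true, bs, bc, fi) (PySem.List.enumerate rest k)).1 =
      (match altInner fi rest with
       | none => acc
       | some (buf, c, r) =>
         (List.foldl stepA (acc ++ [(bs, PySem.Str.join "\n" (bc ++ buf))], false, bs, bc ++ buf, fi)
           (PySem.List.enumerate r (k + c))).1) := by
  intro rest
  induction rest with
  | nil => intro k acc bs bc fi; simp [altInner, PySem.List.enumerate]
  | cons cur rest ih =>
    intro k acc bs bc fi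
    rw [PySem.List.enumerate_cons, List.foldl_cons]
    by_cases hc : PySem.Str.startswith (PySem.Str.lstrip cur) "```" = true ∧
        PySem.Str.len cur - PySem.Str.len (PySem.Str.lstrip cur) ≤ fi
    · simp only [stepA, altInner, Bool.not_true, Bool.false_eq_true, if_false, if_pos hc]
    · simp only [stepA, altInner, Bool.not_true, Bool.false_eq_true, if_false, if_neg hc]
      rw [ih (k + 1) acc bs (bc ++ [cur]) fi]
      cases hin : altInner fi rest with
      | none => simp
      | some v =>
        obtain ⟨buf, c, r⟩ := v
        have hk : k + 1 + c = k + (c + 1) := by ring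
        simp [hk, List.append_assoc]

-- A's fold from the not-in-a-block state computes acc ++ B's outer scan.
theorem foldA_out : ∀ (n : Nat) (lines : List String), lines.length ≤ n →
    ∀ (k : Int) (acc : List (Int × String)) (bs : Int) (bc : List String) (fi : Int),
    (List.foldl stepA (acc, false, bs, bc, fi) (PySem.List.enumerate lines k)).1 =
      acc ++ altScan lines k := by
  intro n
  induction n with
  | zero =>
    intro lines hlen k acc bs bc fi
    have : lines = [] := List.length_eq_zero_iff.mp (Nat.le_zero.mp hlen)
    subst this
    simp [altScan, PySem.List.enumerate]
  | succ n ihn =>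
    intro lines hlen k acc bs bc fi
    match lines with
    | [] => simp [altScan, PySem.List.enumerate]
    | line :: rest =>
      rw [PySem.List.enumerate_cons, List.foldl_cons]
      by_cases ho : PySem.Str.startswith (PySem.Str.lstrip line) "```mermaid" = true
      · simp only [stepA, Bool.not_false, if_true, if_pos ho]
        rw [foldA_in_mermaid rest (k + 1) acc k [line]
          (PySem.Str.len line - PySem.Str.len (PySem.Str.lstrip line))]
        rw [altScan]
        simp only [if_pos ho]
        cases hin : altInner (PySem.Str.len line - PySem.Str.len (PySem.Str.lstrip line)) rest with
        | none => simp
        | some v =>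
          obtain ⟨buf, c, r⟩ := v
          dsimp only
          have hr : r.length ≤ n := le_trans (altInner_length _ _ hin) (by simpa using hlen)
          rw [ihn r hr (k + 1 + c) _ k ([line] ++ buf)
            (PySem.Str.len line - PySem.Str.len (PySem.Str.lstrip line))]
          simp [List.append_assoc]
      · simp only [stepA, Bool.not_false, if_true, if_neg ho]
        rw [ihn rest (by simpa using hlen) (k + 1) acc bs bc fi, altScan]
        rw [if_neg ho]

-- ===== VERDICT (by name: the statement is the Claim_ definition above) =====
theorem find_mermaid_blocks_spec : Claim_equal_find_mermaid_blocks := by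
  intro content _
  unfold Spec_find_mermaid_blocks find_mermaid_blocks find_mermaid_blocks_alt
  simpa using foldA_out _ _ (le_refl _) 1 [] 0 [] 0
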